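-- pv_equiv track=rewrite | github.com/MatthewXiarhos/The-DRUM-PROTOCOLS | moe_sphere_pipeline.py | build_full_survey_context
-- ===== SOURCE A (Python) =====
-- from collections import Counter
--
-- def build_full_survey_context(full_rows, protocols_out):
--     full_by_protocol = {}
--     for r in full_rows:
--         full_by_protocol.setdefault(r["protocol_code"], []).append(r)
--     lines = []
--     for code in sorted(protocols_out.keys()):
--         rows = full_by_protocol.get(code, [])
--         if not rows:
--             continue
--         def top(field, top_n=3):
--             vals = [r.get(field) for r in rows if r.get(field)]
--             if not vals: return "n/a"
--             counts = Counter(vals)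
--             return " / ".join(f"{v}({c})" for v, c in counts.most_common(top_n))
--         listener_counts = Counter(r.get("listener_type") for r in rows if r.get("listener_type"))
--         listener_str    = " | ".join(f"{k}:{v}" for k, v in listener_counts.most_common()) or "n/a"
--         lines.append(
--             f"{code} | n={len(rows)} | listener_type: {listener_str} | "
--             f"change_rating: {top('change_rating')} | settle_time: {top('settle_time', 2)} | "
--             f"activity: {top('activity', 2)} | music_opinion: {top('music_opinion', 2)} | "
--             f"rhythm_opinion: {top('rhythm_opinion', 2)}"
--         )
--     return "\n".join(lines) if lines else "No 1-minute survey responses available yet."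
-- ===== SOURCE B (Python) =====
-- from collections import Counter
--
-- _FIELDS = ("listener_type", "change_rating", "settle_time", "activity",
--            "music_opinion", "rhythm_opinion")
--
-- def _bump(cnt, r, f):
--     v = r.get(f)
--     if v:
--         cnt[v] += 1
--
-- def _fmt(cnt, top_n):
--     if not cnt:
--         return "n/a"
--     return " / ".join(f"{v}({c})" for v, c in cnt.most_common(top_n))
--
-- def build_full_survey_context(full_rows, protocols_out):
--     # one streaming pass: per protocol keep a row count and one Counter per field
--     stats = {}
--     for r in full_rows:
--         rec = stats.setdefault(r["protocol_code"], [0] + [Counter() for _ in _FIELDS])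
--         rec[0] += 1
--         for i, f in enumerate(_FIELDS):
--             _bump(rec[i + 1], r, f)
--     lines = []
--     for code in sorted(protocols_out.keys()):
--         rec = stats.get(code)
--         if rec is None:
--             continue
--         n, lc, cr, st, ac, mu, rh = rec
--         listener = " | ".join(f"{k}:{v}" for k, v in lc.most_common()) or "n/a"
--         lines.append(
--             f"{code} | n={n} | listener_type: {listener} | "
--             f"change_rating: {_fmt(cr, 3)} | settle_time: {_fmt(st, 2)} | "
--             f"activity: {_fmt(ac, 2)} | music_opinion: {_fmt(mu, 2)} | "
--             f"rhythm_opinion: {_fmt(rh, 2)}"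
--         )
--     return "\n".join(lines) if lines else "No 1-minute survey responses available yet."
-- ===== Notes on version B (the rewrite author's own statement) =====
-- stated objective: alternative
-- what changed: Instead of storing each row in a per-protocol bucket and rescanning every bucket once per field to build Counters, B makes one streaming pass over full_rows that maintains, per protocol, a row count plus one pre-built Counter per field, and the formatting phase only reads most_common off those tables.
import Mathlib
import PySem

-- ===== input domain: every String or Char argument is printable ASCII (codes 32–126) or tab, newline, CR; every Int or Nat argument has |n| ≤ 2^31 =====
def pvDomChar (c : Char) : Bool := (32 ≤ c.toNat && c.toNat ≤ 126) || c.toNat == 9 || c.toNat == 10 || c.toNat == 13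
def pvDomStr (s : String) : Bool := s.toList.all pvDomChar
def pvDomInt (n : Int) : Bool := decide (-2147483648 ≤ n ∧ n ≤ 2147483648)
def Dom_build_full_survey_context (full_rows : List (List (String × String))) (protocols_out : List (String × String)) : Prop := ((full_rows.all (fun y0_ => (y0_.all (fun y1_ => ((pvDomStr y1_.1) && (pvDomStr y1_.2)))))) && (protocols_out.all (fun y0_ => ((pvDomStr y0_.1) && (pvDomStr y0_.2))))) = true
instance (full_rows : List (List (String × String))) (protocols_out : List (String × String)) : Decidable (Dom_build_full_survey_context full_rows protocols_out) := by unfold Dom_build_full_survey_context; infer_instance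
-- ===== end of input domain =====

-- B replaces A's store-rows-then-rescan grouping by one streaming pass that keeps, per protocol,
-- a row count and one pre-built counter per field (alternative decomposition, same result).


-- Port of collections.Counter.most_common (documented as sorted(items, key=count, reverse=True),
-- stable; most_common(n) takes the first n). Library helper shared by both ports.
def pyCounterMostCommon (c : PySem.Dict String Int) : List (String × Int) :=
  PySem.List.sorted c.items (fun p => p.2) true

-- ===== PORT A =====
-- [r.get(field) for r in rows if r.get(field)]  (a value is truthy iff the string is nonempty)
def pvTruthyVals (rows : List (PySem.Dict String String)) (field : String) : List String :=
  rows.filterMap (fun r => match PySem.Dict.get? r field with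
    | some v => if v = "" then none else some v
    | none => none)

def pvFmtPair (p : String × Int) : String := p.1 ++ "(" ++ PySem.Int.toStr p.2 ++ ")"

-- the inner helper 'top(field, top_n)'
def pvTopA (rows : List (PySem.Dict String String)) (field : String) (top_n : Nat) : String :=
  let vals := pvTruthyVals rows field
  if vals = [] then "n/a"
  else PySem.Str.join " / " (((pyCounterMostCommon (PySem.Dict.counter vals)).take top_n).map pvFmtPair)

-- one appended line of A's loop body
def pvLineA (code : String) (rows : List (PySem.Dict String String)) : String :=
  let lc := PySem.Dict.counter (pvTruthyVals rows "listener_type")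
  let ls0 := PySem.Str.join " | " ((pyCounterMostCommon lc).map (fun p => p.1 ++ ":" ++ PySem.Int.toStr p.2))
  let ls := if ls0 = "" then "n/a" else ls0
  code ++ " | n=" ++ PySem.Int.toStr ((rows.length : Int)) ++ " | listener_type: " ++ ls ++
  " | change_rating: " ++ pvTopA rows "change_rating" 3 ++ " | settle_time: " ++ pvTopA rows "settle_time" 2 ++
  " | activity: " ++ pvTopA rows "activity" 2 ++ " | music_opinion: " ++ pvTopA rows "music_opinion" 2 ++
  " | rhythm_opinion: " ++ pvTopA rows "rhythm_opinion" 2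

-- r["protocol_code"]: KeyError is excluded by Pre_; getD "" is exact where the key is present
def build_full_survey_context (full_rows : List (List (String × String))) (protocols_out : List (String × String)) : String :=
  let rows := full_rows.map (fun r => PySem.Dict.ofList r)
  let grouped := rows.foldl
    (fun d r => PySem.Dict.modify d (PySem.Dict.getD r "protocol_code" "") [] (fun l => l ++ [r]))
    PySem.Dict.empty
  let codes := PySem.List.sorted (PySem.Dict.ofList protocols_out).keys (fun x => x) false
  let lines := codes.foldl (fun acc code =>
      let rws := PySem.Dict.getD grouped code []
      if rws = [] then acc else acc ++ [pvLineA code rws]) ([] : List String)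
  if lines = [] then "No 1-minute survey responses available yet." else PySem.Str.join "\n" lines

-- ===== PORT B =====
-- per-protocol streamed record: row count + one counter per field
structure SurveyRec where
  n : Int
  lt : PySem.Dict String Int
  cr : PySem.Dict String Int
  st : PySem.Dict String Int
  ac : PySem.Dict String Int
  mu : PySem.Dict String Int
  rh : PySem.Dict String Int

def pvEmptyRec : SurveyRec := ⟨0, PySem.Dict.empty, PySem.Dict.empty, PySem.Dict.empty, PySem.Dict.empty, PySem.Dict.empty, PySem.Dict.empty⟩

-- _bump(cnt, r, f)
def pvBump (c : PySem.Dict String Int) (r : PySem.Dict String String) (f : String) : PySem.Dict String Int :=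
  match PySem.Dict.get? r f with
  | some v => if v = "" then c else PySem.Dict.modify c v 0 (· + 1)
  | none => c

-- the per-row update of B's streaming loop (the enumerate(_FIELDS) loop, unrolled over the six fields)
def pvStep (r : PySem.Dict String String) (rec : SurveyRec) : SurveyRec :=
  { n := rec.n + 1,
    lt := pvBump rec.lt r "listener_type", cr := pvBump rec.cr r "change_rating",
    st := pvBump rec.st r "settle_time", ac := pvBump rec.ac r "activity",
    mu := pvBump rec.mu r "music_opinion", rh := pvBump rec.rh r "rhythm_opinion" }

-- _fmt(cnt, top_n)
def pvFmtB (c : PySem.Dict String Int) (top_n : Nat) : String :=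
  if c.items = [] then "n/a"
  else PySem.Str.join " / " (((pyCounterMostCommon c).take top_n).map (fun p => p.1 ++ "(" ++ PySem.Int.toStr p.2 ++ ")"))

def pvLineB (code : String) (rec : SurveyRec) : String :=
  let ls0 := PySem.Str.join " | " ((pyCounterMostCommon rec.lt).map (fun p => p.1 ++ ":" ++ PySem.Int.toStr p.2))
  let ls := if ls0 = "" then "n/a" else ls0
  code ++ " | n=" ++ PySem.Int.toStr rec.n ++ " | listener_type: " ++ ls ++
  " | change_rating: " ++ pvFmtB rec.cr 3 ++ " | settle_time: " ++ pvFmtB rec.st 2 ++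
  " | activity: " ++ pvFmtB rec.ac 2 ++ " | music_opinion: " ++ pvFmtB rec.mu 2 ++
  " | rhythm_opinion: " ++ pvFmtB rec.rh 2

def build_full_survey_context_alt (full_rows : List (List (String × String))) (protocols_out : List (String × String)) : String :=
  let rows := full_rows.map (fun r => PySem.Dict.ofList r)
  let stats := rows.foldl
    (fun d r => PySem.Dict.modify d (PySem.Dict.getD r "protocol_code" "") pvEmptyRec (pvStep r))
    PySem.Dict.empty
  let codes := PySem.List.sorted (PySem.Dict.ofList protocols_out).keys (fun x => x) false
  let lines := codes.foldl (fun acc code =>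
      match PySem.Dict.get? stats code with
      | none => acc
      | some rec => acc ++ [pvLineB code rec]) ([] : List String)
  if lines = [] then "No 1-minute survey responses available yet." else PySem.Str.join "\n" lines

-- ===== PRECONDITION & SPEC =====
-- Pre_ excludes exactly the rows on which Python A raises KeyError: every row must carry "protocol_code"
def Pre_build_full_survey_context (full_rows : List (List (String × String))) (protocols_out : List (String × String)) : Prop :=
  ∀ r ∈ full_rows, "protocol_code" ∈ r.map (·.1)
instance (full_rows : List (List (String × String))) (protocols_out : List (String × String)) : Decidable (Pre_build_full_survey_context full_rows protocols_out) := by unfold Pre_build_full_survey_context; infer_instance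

def pvWitness_build_full_survey_context : (List (List (String × String))) × (List (String × String)) :=
  ([[("protocol_code", "A"), ("listener_type", "calm")], [("protocol_code", "A"), ("change_rating", "4")]], [("A", "drum")])

def Spec_build_full_survey_context (full_rows : List (List (String × String))) (protocols_out : List (String × String)) (out : String) : Prop := out = build_full_survey_context_alt full_rows protocols_out
instance (full_rows : List (List (String × String))) (protocols_out : List (String × String)) (out : String) : Decidable (Spec_build_full_survey_context full_rows protocols_out out) := by unfold Spec_build_full_survey_context; infer_instance

-- ===== CLAIM (what is proved, stated in full; the proofs are below) =====
def Claim_equal_build_full_survey_context : Prop := ∀ (full_rows : List (List (String × String))) (protocols_out : List (String × String)), Dom_build_full_survey_context full_rows protocols_out → Pre_build_full_survey_context full_rows protocols_out → Spec_build_full_survey_context full_rows protocols_out (build_full_survey_context full_rows protocols_out)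

-- ===== LEMMAS AND PROOFS =====

-- a keyed modify-loop, read back at one key: the fold over the rows with that key
theorem getD_foldl_modify_key {ν : Type} (key : PySem.Dict String String → String)
    (init : ν) (step : PySem.Dict String String → ν → ν) (c : String) :
    ∀ (l : List (PySem.Dict String String)) (d : PySem.Dict String ν),
    (l.foldl (fun d r => PySem.Dict.modify d (key r) init (step r)) d).getD c init
      = (l.filter (fun r => key r == c)).foldl (fun a r => step r a) (d.getD c init) := by
  intro l
  induction l with
  | nil => intro d; simp
  | cons r t ih =>
    intro d
    by_cases h : key r = c
    · simp only [List.foldl_cons, List.filter_cons, h, BEq.rfl, if_pos trivial, ih]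
      rw [PySem.Dict.getD_modify_self]
    · have hb : (key r == c) = false := by simp [h]
      simp only [List.foldl_cons, List.filter_cons, hb, Bool.false_eq_true, ih]
      rw [PySem.Dict.getD_modify_of_ne _ _ _ (fun hc => h hc.symm)]
      simp

theorem contains_foldl_modify_key {ν : Type} (key : PySem.Dict String String → String)
    (init : ν) (step : PySem.Dict String String → ν → ν) (c : String) :
    ∀ (l : List (PySem.Dict String String)) (d : PySem.Dict String ν),
    (l.foldl (fun d r => PySem.Dict.modify d (key r) init (step r)) d).contains c
      = (d.contains c || l.any (fun r => key r == c)) := by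
  intro l
  induction l with
  | nil => intro d; simp
  | cons r t ih =>
    intro d
    rw [List.foldl_cons, ih, PySem.Dict.contains_modify]
    simp only [List.any_cons]
    cases hb : (c == key r) <;> cases hb' : (key r == c) <;>
      simp only [beq_iff_eq, beq_eq_false_iff_ne, ne_eq] at hb hb' <;>
      first | (exfalso; exact hb' hb.symm) | (exfalso; exact hb hb'.symm) | simp [Bool.or_comm]

theorem get?_of_contains {ν : Type} (d : PySem.Dict String ν) (k : String) (d0 : ν)
    (h : d.contains k = true) : d.get? k = some (d.getD k d0) := by
  cases hg : d.get? k with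
  | none => rw [PySem.Dict.get?_eq_none_iff_contains] at hg; simp [hg] at h
  | some v => rw [PySem.Dict.getD_eq_get?_getD, hg]; rfl

-- B's streamed record, projected field by field
theorem foldl_pvStep (fl : List (PySem.Dict String String)) (e : SurveyRec) :
    fl.foldl (fun a r => pvStep r a) e =
    ⟨e.n + fl.length,
     fl.foldl (fun c r => pvBump c r "listener_type") e.lt,
     fl.foldl (fun c r => pvBump c r "change_rating") e.cr,
     fl.foldl (fun c r => pvBump c r "settle_time") e.st,
     fl.foldl (fun c r => pvBump c r "activity") e.ac,
     fl.foldl (fun c r => pvBump c r "music_opinion") e.mu,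
     fl.foldl (fun c r => pvBump c r "rhythm_opinion") e.rh⟩ := by
  induction fl generalizing e with
  | nil => simp
  | cons r t ih =>
    rw [List.foldl_cons, ih]
    simp only [pvStep, List.foldl_cons, List.length_cons, SurveyRec.mk.injEq]
    and_intros <;> first | trivial | (push_cast; ring)

-- bumping per row is counting the truthy values
theorem foldl_pvBump (f : String) :
    ∀ (fl : List (PySem.Dict String String)) (d : PySem.Dict String Int),
    fl.foldl (fun c r => pvBump c r f) d
      = (pvTruthyVals fl f).foldl (fun c v => PySem.Dict.modify c v 0 (· + 1)) d := by
  intro fl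
  induction fl with
  | nil => intro d; simp [pvTruthyVals]
  | cons r t ih =>
    intro d
    rw [List.foldl_cons, ih]
    simp only [pvTruthyVals, List.filterMap_cons]
    cases hg : PySem.Dict.get? r f with
    | none => simp [pvBump, hg]
    | some v => by_cases hv : v = "" <;> simp [pvBump, hg, hv, List.foldl_cons]

theorem counter_truthy (f : String) (fl : List (PySem.Dict String String)) :
    fl.foldl (fun c r => pvBump c r f) PySem.Dict.empty
      = PySem.Dict.counter (pvTruthyVals fl f) := by
  rw [foldl_pvBump, PySem.Dict.counter_eq_foldl]

theorem counter_items_nil (xs : List String) : (PySem.Dict.counter xs).items = [] ↔ xs = [] := by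
  rw [PySem.Dict.items_counter]
  cases xs with
  | nil => simp [PySem.Set.ofList]
  | cons x t => simp [PySem.Set.ofList_cons]

theorem topA_eq_fmtB (rows : List (PySem.Dict String String)) (f : String) (n : Nat) :
    pvTopA rows f n = pvFmtB (PySem.Dict.counter (pvTruthyVals rows f)) n := by
  unfold pvTopA pvFmtB
  by_cases h : pvTruthyVals rows f = []
  · simp [h, counter_items_nil]
  · rw [if_neg h, if_neg (by simpa [counter_items_nil] using h)]
    rfl

-- the formatted line agrees: A from the stored bucket, B from the streamed record
theorem lineA_eq_lineB (c : String) (fl : List (PySem.Dict String String)) :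
    pvLineA c fl = pvLineB c (fl.foldl (fun a r => pvStep r a) pvEmptyRec) := by
  rw [foldl_pvStep]
  simp only [pvLineB, pvEmptyRec, counter_truthy, topA_eq_fmtB, pvLineA]
  norm_num

-- ===== VERDICT (by name: the statement is the Claim_ definition above) =====
theorem build_full_survey_context_spec : Claim_equal_build_full_survey_context := by
  intro full_rows protocols_out _ _
  unfold Spec_build_full_survey_context build_full_survey_context build_full_survey_context_alt
  simp only []
  set rows := List.map (fun r => PySem.Dict.ofList r) full_rows with hrows
  set codes := PySem.List.sorted (PySem.Dict.ofList protocols_out).keys (fun x => x) false with hcodes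
  have hbody : ∀ (acc : List String), ∀ code ∈ codes,
      (if (rows.foldl (fun d r => PySem.Dict.modify d (PySem.Dict.getD r "protocol_code" "") [] (fun l => l ++ [r])) PySem.Dict.empty).getD code [] = [] then acc
       else acc ++ [pvLineA code ((rows.foldl (fun d r => PySem.Dict.modify d (PySem.Dict.getD r "protocol_code" "") [] (fun l => l ++ [r])) PySem.Dict.empty).getD code [])])
      = (match (rows.foldl (fun d r => PySem.Dict.modify d (PySem.Dict.getD r "protocol_code" "") pvEmptyRec (pvStep r)) PySem.Dict.empty).get? code with
         | none => acc
         | some rec => acc ++ [pvLineB code rec]) := by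
    intro acc code _
    have hA : (rows.foldl (fun d r => PySem.Dict.modify d (PySem.Dict.getD r "protocol_code" "") [] (fun l => l ++ [r])) PySem.Dict.empty).getD code []
        = rows.filter (fun r => PySem.Dict.getD r "protocol_code" "" == code) := by
      rw [getD_foldl_modify_key (fun r => PySem.Dict.getD r "protocol_code" "") [] (fun r l => l ++ [r]) code rows PySem.Dict.empty,
          PySem.Dict.getD_empty, PySem.List.foldl_append_singleton_eq_self, List.nil_append]
    have hgd : (rows.foldl (fun d r => PySem.Dict.modify d (PySem.Dict.getD r "protocol_code" "") pvEmptyRec (pvStep r)) PySem.Dict.empty).getD code pvEmptyRec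
        = (rows.filter (fun r => PySem.Dict.getD r "protocol_code" "" == code)).foldl (fun a r => pvStep r a) pvEmptyRec := by
      rw [getD_foldl_modify_key (fun r => PySem.Dict.getD r "protocol_code" "") pvEmptyRec pvStep code rows PySem.Dict.empty,
          PySem.Dict.getD_empty]
    have hcont : (rows.foldl (fun d r => PySem.Dict.modify d (PySem.Dict.getD r "protocol_code" "") pvEmptyRec (pvStep r)) PySem.Dict.empty).contains code
        = rows.any (fun r => PySem.Dict.getD r "protocol_code" "" == code) := by
      rw [contains_foldl_modify_key (fun r => PySem.Dict.getD r "protocol_code" "") pvEmptyRec pvStep code rows PySem.Dict.empty,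
          PySem.Dict.contains_empty, Bool.false_or]
    by_cases hfl : rows.filter (fun r => PySem.Dict.getD r "protocol_code" "" == code) = []
    · have hany : rows.any (fun r => PySem.Dict.getD r "protocol_code" "" == code) = false := by
        rw [List.any_eq_false]
        intro r hr
        have := List.filter_eq_nil_iff.mp hfl r hr
        simpa using this
      have hnone : (rows.foldl (fun d r => PySem.Dict.modify d (PySem.Dict.getD r "protocol_code" "") pvEmptyRec (pvStep r)) PySem.Dict.empty).get? code = none := by
        rw [PySem.Dict.get?_eq_none_iff_contains, hcont, hany]
      rw [hA, hnone, if_pos hfl]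
    · have hany : rows.any (fun r => PySem.Dict.getD r "protocol_code" "" == code) = true := by
        rcases List.ne_nil_iff_exists_cons.mp hfl with ⟨r, t, hrt⟩
        have hr : r ∈ rows.filter (fun r => PySem.Dict.getD r "protocol_code" "" == code) := by
          rw [hrt]; exact List.mem_cons_self
        rw [List.any_eq_true]
        obtain ⟨hmem, hpred⟩ := List.mem_filter.mp hr
        exact ⟨r, hmem, hpred⟩
      have hsome := get?_of_contains _ code pvEmptyRec (by rw [hcont, hany])
      rw [hA, hsome, hgd, if_neg hfl]
      simp [lineA_eq_lineB]
  rw [PySem.List.foldl_congr_mem codes _ _ ([] : List String) hbody]
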